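-- pv_equiv track=rewrite | github.com/pypi-data/pypi-mirror-385 | packages/goedels-poetry/goedels_poetry-0.0.2-py3-none-any.whl/goedels_poetry/agents/util/common.py | _find_preamble_end
-- ===== SOURCE A (Python) =====
-- def _is_lean_declaration_line(s: str) -> bool:
--     """Check if a line is a Lean declaration."""
--     return (
--         s.startswith("theorem ")
--         or s.startswith("def ")
--         or s.startswith("lemma ")
--         or s.startswith("example ")
--         or s.startswith("axiom ")
--         or s.startswith("inductive ")
--         or s.startswith("structure ")
--         or s.startswith("class ")
--     )
--
-- def _is_preamble_line(s: str) -> bool: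
--     """Check if a line is a preamble line (import, open, etc.)."""
--     return (
--         s.startswith("import ")
--         or s.startswith("open ")
--         or s.startswith("set_option ")
--         or s.startswith("noncomputable ")
--         or s == ""
--     )
--
-- def _is_doc_comment(lines: list[str], i: int) -> bool:
--     """Check if a comment at line i is a doc comment (precedes a declaration)."""
--     for j in range(i + 1, len(lines)):
--         next_stripped = lines[j].strip()
--         if next_stripped != "":
--             return _is_lean_declaration_line(next_stripped)
--     return False
--
-- def _find_preamble_end(lines: list[str]) -> int:
--     """Find the line index where the preamble ends."""
--     skip_until = 0
--     in_multiline_comment = False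
--
--     for i, line in enumerate(lines):
--         stripped = line.strip()
--
--         # Handle multiline comments
--         if stripped.startswith("/-"):
--             in_multiline_comment = True
--             skip_until = i + 1
--             continue
--         if in_multiline_comment:
--             if stripped.endswith("-/") or stripped == "-/":
--                 in_multiline_comment = False
--             skip_until = i + 1
--             continue
--
--         # Check if this is actual Lean code
--         if _is_lean_declaration_line(stripped):
--             break
--
--         # Check if this is a doc comment
--         if stripped.startswith("--"):
--             if _is_doc_comment(lines, i):
--                 break
--             skip_until = i + 1
--             continue
--
--         # Check if this is a preamble line
--         if _is_preamble_line(stripped):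
--             skip_until = i + 1
--         else:
--             break
--
--     return skip_until
-- ===== SOURCE B (Python) =====
-- _DECL_PREFIXES = ("theorem ", "def ", "lemma ", "example ", "axiom ",
--                   "inductive ", "structure ", "class ")
-- _PREAMBLE_PREFIXES = ("import ", "open ", "set_option ", "noncomputable ")
--
--
-- def _find_preamble_end(lines: list[str]) -> int:
--     """Find the line index where the preamble ends.
--
--     The 'is the next non-empty line a declaration?' flag is precomputed
--     in one backward pass instead of a forward re-scan per comment line."""
--     n = len(lines)
--     next_decl = [False] * n
--     cur = False
--     for i in range(n - 1, -1, -1):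
--         next_decl[i] = cur
--         s = lines[i].strip()
--         if s != "":
--             cur = s.startswith(_DECL_PREFIXES)
--
--     skip = 0
--     in_ml = False
--     for i, line in enumerate(lines):
--         st = line.strip()
--         if st.startswith("/-"):
--             in_ml = True
--             skip = i + 1
--             continue
--         if in_ml:
--             if st.endswith("-/"):
--                 in_ml = False
--             skip = i + 1
--             continue
--         if st.startswith(_DECL_PREFIXES):
--             break
--         if st.startswith("--"):
--             if next_decl[i]:
--                 break
--             skip = i + 1
--             continue
--         if st.startswith(_PREAMBLE_PREFIXES) or st == "":
--             skip = i + 1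
--         else:
--             break
--     return skip
-- ===== Notes on version B (the rewrite author's own statement) =====
-- stated objective: alternative
-- what changed: A's per-comment-line forward lookahead (_is_doc_comment rescans the rest of the list) is replaced by a next-nonempty-line-is-declaration flag list precomputed in one backward pass, consumed in lockstep by the main scan; it avoids nested rescans but always pays the full precompute pass.
import Mathlib
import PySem

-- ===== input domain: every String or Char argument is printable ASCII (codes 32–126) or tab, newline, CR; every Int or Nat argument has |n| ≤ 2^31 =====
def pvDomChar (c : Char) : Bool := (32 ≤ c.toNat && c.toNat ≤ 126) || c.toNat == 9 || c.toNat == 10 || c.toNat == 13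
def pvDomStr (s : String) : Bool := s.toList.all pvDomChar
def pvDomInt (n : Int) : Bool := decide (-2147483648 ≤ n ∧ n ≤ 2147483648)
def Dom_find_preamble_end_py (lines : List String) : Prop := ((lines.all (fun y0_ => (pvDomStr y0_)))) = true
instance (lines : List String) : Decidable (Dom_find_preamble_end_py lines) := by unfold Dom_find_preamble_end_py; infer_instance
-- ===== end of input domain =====

-- B precomputes the "next non-empty line is a declaration" flag in one backward pass,
-- replacing A's forward re-scan per comment line (an alternative decomposition).

-- ===== PORT A =====
-- _is_lean_declaration_line
def pvIsDeclA (s : String) : Bool :=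
  PySem.Str.startswith s "theorem " || PySem.Str.startswith s "def " ||
  PySem.Str.startswith s "lemma " || PySem.Str.startswith s "example " ||
  PySem.Str.startswith s "axiom " || PySem.Str.startswith s "inductive " ||
  PySem.Str.startswith s "structure " || PySem.Str.startswith s "class "

-- _is_preamble_line
def pvIsPreA (s : String) : Bool :=
  PySem.Str.startswith s "import " || PySem.Str.startswith s "open " ||
  PySem.Str.startswith s "set_option " || PySem.Str.startswith s "noncomputable " ||
  s == ""

-- _is_doc_comment(lines, i): Python scans lines[j] for j in range(i+1, len(lines));
-- ported on the suffix of lines after index i (the same sequence of lines) — exact.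
def pvIsDocComment : List String → Bool
  | [] => false
  | x :: xs =>
    let ns := PySem.Str.strip x
    if ns ≠ "" then pvIsDeclA ns else pvIsDocComment xs

-- the for-loop of _find_preamble_end with its breaks, as structural recursion
def pvGoA : List String → Nat → Int → Bool → Int
  | [], _, skip, _ => skip
  | line :: rs, i, skip, inml =>
    let st := PySem.Str.strip line
    if PySem.Str.startswith st "/-" then pvGoA rs (i+1) ((i : Int)+1) true
    else if inml then
      pvGoA rs (i+1) ((i : Int)+1)
        (if PySem.Str.endswith st "-/" || st == "-/" then false else true)
    else if pvIsDeclA st then skip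
    else if PySem.Str.startswith st "--" then
      (if pvIsDocComment rs then skip else pvGoA rs (i+1) ((i : Int)+1) inml)
    else if pvIsPreA st then pvGoA rs (i+1) ((i : Int)+1) inml
    else skip

def find_preamble_end_py (lines : List String) : Int := pvGoA lines 0 0 false

-- ===== PORT B =====
def pvDeclPrefixes : List String :=
  ["theorem ", "def ", "lemma ", "example ", "axiom ", "inductive ", "structure ", "class "]

def pvPrePrefixes : List String :=
  ["import ", "open ", "set_option ", "noncomputable "]

def pvIsDeclB (s : String) : Bool := pvDeclPrefixes.any (fun p => PySem.Str.startswith s p)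

-- B's backward pass: returns (flag list for this suffix, cur = "first non-empty line of
-- this suffix is a declaration"); equals Source B's loop over i from n-1 down to 0.
def pvFlags : List String → List Bool × Bool
  | [] => ([], false)
  | line :: rs =>
    let p := pvFlags rs
    let s := PySem.Str.strip line
    (p.2 :: p.1, if s ≠ "" then pvIsDeclB s else p.2)

-- B's forward loop: consumes the line list and its flag list in lockstep
def pvGoB : List String → List Bool → Nat → Int → Bool → Int
  | [], _, _, skip, _ => skip
  | line :: rs, fs, i, skip, inml =>
    let st := PySem.Str.strip line
    if PySem.Str.startswith st "/-" then pvGoB rs fs.tail (i+1) ((i : Int)+1) true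
    else if inml then
      pvGoB rs fs.tail (i+1) ((i : Int)+1)
        (if PySem.Str.endswith st "-/" then false else true)
    else if pvIsDeclB st then skip
    else if PySem.Str.startswith st "--" then
      (if fs.headD false then skip else pvGoB rs fs.tail (i+1) ((i : Int)+1) inml)
    else if pvPrePrefixes.any (fun p => PySem.Str.startswith st p) || st == "" then
      pvGoB rs fs.tail (i+1) ((i : Int)+1) inml
    else skip

def find_preamble_end_py_alt (lines : List String) : Int :=
  pvGoB lines (pvFlags lines).1 0 0 false

-- ===== PRECONDITION & SPEC =====
def Spec_find_preamble_end_py (lines : List String) (out : Int) : Prop := out = find_preamble_end_py_alt lines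
instance (lines : List String) (out : Int) : Decidable (Spec_find_preamble_end_py lines out) := by unfold Spec_find_preamble_end_py; infer_instance

-- ===== CLAIM (what is proved, stated in full; the proofs are below) =====
def Claim_equal_find_preamble_end_py : Prop := ∀ (lines : List String), Dom_find_preamble_end_py lines → Spec_find_preamble_end_py lines (find_preamble_end_py lines)

-- ===== LEMMAS AND PROOFS =====
theorem pvDeclAB (s : String) : pvIsDeclB s = pvIsDeclA s := by
  simp [pvIsDeclB, pvIsDeclA, pvDeclPrefixes, List.any_cons, List.any_nil,
        Bool.or_assoc, Bool.or_false]

theorem pvPreAB (s : String) :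
    (pvPrePrefixes.any (fun p => PySem.Str.startswith s p) || s == "") = pvIsPreA s := by
  simp [pvIsPreA, pvPrePrefixes, List.any_cons, List.any_nil, Bool.or_assoc, Bool.or_false]

theorem pvEndsw (st : String) :
    (PySem.Str.endswith st "-/" || st == "-/") = PySem.Str.endswith st "-/" := by
  cases h : (st == "-/") with
  | false => simp
  | true =>
    have : st = "-/" := by simpa using h
    subst this; decide

theorem pvFlags_snd (xs : List String) : (pvFlags xs).2 = pvIsDocComment xs := by
  induction xs with
  | nil => rfl
  | cons l rs ih => simp only [pvFlags, pvIsDocComment, pvDeclAB, ih]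

theorem pvFlags_fst_cons (l : String) (rs : List String) :
    (pvFlags (l :: rs)).1 = pvIsDocComment rs :: (pvFlags rs).1 := by
  simp only [pvFlags, pvFlags_snd]

theorem pvGo_eq : ∀ (rest : List String) (i : Nat) (skip : Int) (inml : Bool),
    pvGoB rest (pvFlags rest).1 i skip inml = pvGoA rest i skip inml := by
  intro rest
  induction rest with
  | nil => intro i skip inml; rfl
  | cons l rs ih =>
    intro i skip inml
    rw [pvFlags_fst_cons]
    simp only [pvGoA, pvGoB, List.tail_cons, List.headD_cons, pvDeclAB, pvPreAB, pvEndsw]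
    split_ifs <;> first | rfl | exact ih _ _ _

-- ===== VERDICT (by name: the statement is the Claim_ definition above) =====
theorem find_preamble_end_py_spec : Claim_equal_find_preamble_end_py := by
  intro lines _
  unfold Spec_find_preamble_end_py find_preamble_end_py find_preamble_end_py_alt
  exact (pvGo_eq lines 0 0 false).symm
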